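-- pv_equiv track=rewrite | github.com/abferris/boot.dev_intro | src/ch8.py | meditate
-- ===== SOURCE A (Python) =====
-- def meditate(mana, max_mana, num_potions):
--     meditation = True
--     while meditation:
--         if mana == max_mana or num_potions == 0:
--             meditation = False
--         else :
--             num_potions -= 1
--             mana += 1
--     return [mana, num_potions]
-- ===== SOURCE B (Python) =====
-- def meditate(mana, max_mana, num_potions):
--     # The process stops as soon as a counter hits its target: mana rising to
--     # max_mana, or the potion count falling to 0.  A counter that starts on the
--     # wrong side of its target never hits it, so only the nonnegative distances
--     # are candidate stopping times; the earliest one wins.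
--     t = min(x for x in (max_mana - mana, num_potions) if x >= 0)
--     return [mana + t, num_potions - t]
-- ===== Notes on version B (the rewrite author's own statement) =====
-- stated objective: faster
-- what changed: Replaced the one-potion-at-a-time while loop by a closed form: the number of potions drunk is the smallest nonnegative distance of either counter to its target; Pre_ excludes inputs with mana above max_mana and a negative potion count, on which A's loop never terminates.
import Mathlib
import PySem

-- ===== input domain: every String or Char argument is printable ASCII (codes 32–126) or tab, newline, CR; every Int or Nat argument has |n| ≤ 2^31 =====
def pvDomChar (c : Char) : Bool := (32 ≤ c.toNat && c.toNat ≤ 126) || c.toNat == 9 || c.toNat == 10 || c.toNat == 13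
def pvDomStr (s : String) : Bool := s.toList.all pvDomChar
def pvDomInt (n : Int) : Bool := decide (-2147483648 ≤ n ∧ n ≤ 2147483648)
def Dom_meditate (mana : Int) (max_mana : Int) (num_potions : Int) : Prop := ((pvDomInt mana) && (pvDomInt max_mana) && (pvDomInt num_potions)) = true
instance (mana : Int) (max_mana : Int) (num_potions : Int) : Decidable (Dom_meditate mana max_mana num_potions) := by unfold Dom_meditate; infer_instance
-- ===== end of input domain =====

-- B replaces A's one-potion-at-a-time while loop by a closed-form stopping time (faster); Pre_ excludes the inputs on which A's loop never terminates.


-- ===== PORT A =====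
-- A's `while meditation:` loop, fuel-bounded; the fuel chosen in `meditate` is
-- strictly more than the number of iterations on every input where A terminates.
def meditateLoop : Nat → Int → Int → Int → List Int
  | 0, mana, _, num_potions => [mana, num_potions]
  | fuel + 1, mana, max_mana, num_potions =>
    if mana = max_mana ∨ num_potions = 0 then [mana, num_potions]
    else meditateLoop fuel (mana + 1) max_mana (num_potions - 1)

def meditate (mana : Int) (max_mana : Int) (num_potions : Int) : List Int :=
  meditateLoop ((max_mana - mana).toNat + num_potions.toNat + 1) mana max_mana num_potions

-- ===== PORT B =====
-- min() of an empty sequence raises ValueError (only when both distances are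
-- negative, outside Pre_); the port returns [] there.
def meditate_alt (mana : Int) (max_mana : Int) (num_potions : Int) : List Int :=
  match PySem.List.min? (([max_mana - mana, num_potions]).filter (fun x => 0 ≤ x)) (fun x => x) with
  | some t => [mana + t, num_potions - t]
  | none => []

-- ===== PRECONDITION & SPEC =====
-- A's while loop never terminates when mana already exceeds max_mana and the potion
-- count is negative (neither stop condition is ever reached); exactly those inputs are excluded.
def Pre_meditate (mana : Int) (max_mana : Int) (num_potions : Int) : Prop :=
  ¬ (max_mana < mana ∧ num_potions < 0)
instance (mana : Int) (max_mana : Int) (num_potions : Int) : Decidable (Pre_meditate mana max_mana num_potions) := by unfold Pre_meditate; infer_instance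

def pvWitness_meditate : Int × Int × Int := (3, 10, 4)

def Spec_meditate (mana : Int) (max_mana : Int) (num_potions : Int) (out : List Int) : Prop := out = meditate_alt mana max_mana num_potions
instance (mana : Int) (max_mana : Int) (num_potions : Int) (out : List Int) : Decidable (Spec_meditate mana max_mana num_potions out) := by unfold Spec_meditate; infer_instance

-- ===== CLAIM (what is proved, stated in full; the proofs are below) =====
def Claim_equal_meditate : Prop := ∀ (mana : Int) (max_mana : Int) (num_potions : Int), Dom_meditate mana max_mana num_potions → Pre_meditate mana max_mana num_potions → Spec_meditate mana max_mana num_potions (meditate mana max_mana num_potions)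

-- ===== LEMMAS AND PROOFS =====

-- stepping the loop once keeps B's closed form unchanged
lemma alt_step (mana max_mana num_potions : Int)
    (hm : mana ≠ max_mana) (hp : num_potions ≠ 0) :
    meditate_alt (mana + 1) max_mana (num_potions - 1) = meditate_alt mana max_mana num_potions := by
  simp only [meditate_alt, List.filter, PySem.List.min?]
  by_cases h1 : mana < max_mana <;> by_cases h2 : (1:Int) ≤ num_potions <;>
    by_cases h3 : mana ≤ max_mana <;> by_cases h4 : (0:Int) ≤ num_potions <;>
    simp [h1, h2, h3, h4, List.foldl] <;> (try split_ifs) <;> (try simp_all) <;> omega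

lemma loop_eq (fuel : Nat) : ∀ (mana max_mana num_potions : Int),
    ¬ (max_mana < mana ∧ num_potions < 0) →
    (max_mana - mana).toNat + num_potions.toNat < fuel →
    meditateLoop fuel mana max_mana num_potions = meditate_alt mana max_mana num_potions := by
  induction fuel with
  | zero => intro _ _ _ _ h; omega
  | succ n ih =>
    intro mana max_mana num_potions hpre hf
    rw [meditateLoop]
    by_cases hstop : mana = max_mana ∨ num_potions = 0
    · rw [if_pos hstop]
      simp only [meditate_alt, List.filter, PySem.List.min?]
      by_cases h3 : mana ≤ max_mana <;> by_cases h4 : (0:Int) ≤ num_potions <;>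
        simp [h3, h4, List.foldl] <;> (try split_ifs) <;> (try simp_all) <;> omega
    · rw [if_neg hstop]
      push Not at hstop
      rw [ih (mana + 1) max_mana (num_potions - 1) (by omega) (by omega)]
      exact alt_step mana max_mana num_potions hstop.1 hstop.2

-- ===== VERDICT (by name: the statement is the Claim_ definition above) =====
theorem meditate_spec : Claim_equal_meditate := by
  intro mana max_mana num_potions _ hpre
  unfold Spec_meditate meditate
  exact loop_eq _ mana max_mana num_potions hpre (by omega)
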